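-- pv_equiv track=rewrite | github.com/ATZakir/Google-FooBar | challenges/when_it_rains_it_pours.py | find_forward_total
-- ===== SOURCE A (Python) =====
-- def find_forward_total(sub_heights):
-- 	forward_max = max(sub_heights)
-- 	loc = sub_heights.index(forward_max)
-- 	if len(sub_heights) < 2:
-- 		return 0
-- 	elif loc == 0:
-- 		right_total = find_forward_total(sub_heights[1:])
-- 		return right_total
-- 	else:
-- 		left_total = sub_heights[loc]*loc - sum(sub_heights[:loc])
-- 		if loc + 1 == len(sub_heights):
-- 			right_total = 0
-- 		else:
-- 			right_total = find_forward_total(sub_heights[loc+1:])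
-- 		return left_total + right_total
-- ===== SOURCE B (Python) =====
-- def find_forward_total(sub_heights):
--     total = 0
--     curmax = sub_heights[-1]
--     for h in reversed(sub_heights):
--         if h > curmax:
--             curmax = h
--         total += curmax - h
--     return total
-- ===== Notes on version B (the rewrite author's own statement) =====
-- stated objective: faster
-- what changed: Replaced the recursive find-the-max/split-and-recurse algorithm (max, index, slices and sums at every level) by a single right-to-left pass maintaining the running suffix maximum and accumulating curmax - h.
import Mathlib
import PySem

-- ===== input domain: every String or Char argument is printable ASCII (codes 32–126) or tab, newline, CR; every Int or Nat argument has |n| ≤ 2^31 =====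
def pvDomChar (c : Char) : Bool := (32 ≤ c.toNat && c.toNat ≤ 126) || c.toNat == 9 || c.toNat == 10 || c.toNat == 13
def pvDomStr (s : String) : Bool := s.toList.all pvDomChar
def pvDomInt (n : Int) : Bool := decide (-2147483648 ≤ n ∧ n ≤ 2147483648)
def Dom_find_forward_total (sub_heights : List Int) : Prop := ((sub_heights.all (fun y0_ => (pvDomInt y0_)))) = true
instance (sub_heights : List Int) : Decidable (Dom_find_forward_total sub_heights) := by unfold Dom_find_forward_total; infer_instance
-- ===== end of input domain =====

-- B replaces A's recursive max/index/split-and-recurse scheme by one right-to-left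
-- pass tracking the running suffix maximum (faster in a timing run's measurement).

-- ===== PORT A =====
def find_forward_total (sub_heights : List Int) : Int :=
  match PySem.List.max? sub_heights (fun y => y) with
  | none => 0   -- max([]) raises ValueError in Python; excluded by Pre_
  | some forward_max =>
    match PySem.List.index? sub_heights forward_max with
    | none => 0   -- unreachable: forward_max is an element of sub_heights
    | some loc =>
      if _h2 : sub_heights.length < 2 then 0
      else if _h0 : loc = 0 then
        find_forward_total (PySem.List.slice sub_heights (some 1) none)
      else
        let left_total : Int := (PySem.List.pyGet? sub_heights (loc : Int)).getD 0 * (loc : Int)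
            - (PySem.List.slice sub_heights none (some (loc : Int))).sum
            -- pyGet? is always `some` here (loc < length), so the 0 default never applies
        if loc + 1 = sub_heights.length then left_total + 0
        else left_total + find_forward_total (PySem.List.slice sub_heights (some ((loc : Int) + 1)) none)
termination_by sub_heights.length
decreasing_by
  · simp [PySem.List.slice_from]
    omega
  · have : ((loc : Int) + 1) = ((loc + 1 : Nat) : Int) := by push_cast; ring
    rw [this, PySem.List.slice_from_natCast]
    simp
    omega

-- ===== PORT B =====
def bstep (st : Int × Int) (h : Int) : Int × Int :=
  let curmax := if h > st.1 then h else st.1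
  (curmax, st.2 + (curmax - h))

def find_forward_total_alt (sub_heights : List Int) : Int :=
  match PySem.List.pyGet? sub_heights (-1) with
  | none => 0   -- sub_heights[-1] raises IndexError on []; excluded by Pre_
  | some curmax0 => (sub_heights.reverse.foldl bstep (curmax0, 0)).2

-- ===== PRECONDITION & SPEC =====
-- Pre_ excludes only the empty list, on which Python's A raises ValueError (max of empty sequence).
def Pre_find_forward_total (sub_heights : List Int) : Prop := sub_heights ≠ []
instance (sub_heights : List Int) : Decidable (Pre_find_forward_total sub_heights) := by unfold Pre_find_forward_total; infer_instance
def pvWitness_find_forward_total : List Int := [3, 1, 2]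

def Spec_find_forward_total (sub_heights : List Int) (out : Int) : Prop := out = find_forward_total_alt sub_heights
instance (sub_heights : List Int) (out : Int) : Decidable (Spec_find_forward_total sub_heights out) := by unfold Spec_find_forward_total; infer_instance

-- ===== CLAIM (what is proved, stated in full; the proofs are below) =====
def Claim_equal_find_forward_total : Prop := ∀ (sub_heights : List Int), Dom_find_forward_total sub_heights → Pre_find_forward_total sub_heights → Spec_find_forward_total sub_heights (find_forward_total sub_heights)

-- ===== LEMMAS AND PROOFS =====

/-- Reference value: `G xs = some (m, t)` where `m` is the maximum of `xs` and
`t = Σ_i (suffix-max at i − xs_i)`; `none` iff `xs = []`. -/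
def G : List Int → Option (Int × Int)
  | [] => none
  | x :: xs =>
    match G xs with
    | none => some (x, 0)
    | some (m, t) => let m' := if x > m then x else m; some (m', t + (m' - x))

theorem G_fst_mem : ∀ (xs : List Int) (m t : Int), G xs = some (m, t) → m ∈ xs := by
  intro xs
  induction xs with
  | nil => intro m t h; simp [G] at h
  | cons x xs ih =>
    intro m t h
    cases hG : G xs with
    | none => simp [G, hG] at h; simp [h.1]
    | some p =>
      obtain ⟨m', t'⟩ := p
      have hm' : m' ∈ xs := ih m' t' hG
      simp only [G, hG, Option.some.injEq, Prod.mk.injEq] at h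
      obtain ⟨h1, -⟩ := h
      rw [← h1]
      by_cases hx : x > m'
      · simp [hx]
      · simp only [if_neg hx]
        exact List.mem_cons_of_mem x hm'

/-- Pushing the maximum in front leaves the total unchanged. -/
theorem G_cons_max (m : Int) (r : List Int) (hmax : ∀ y ∈ r, y ≤ m) :
    G (m :: r) = some (m, (G r).elim 0 Prod.snd) := by
  cases hG : G r with
  | none => simp [G, hG]
  | some p =>
    obtain ⟨m', t'⟩ := p
    have hm' : m' ≤ m := hmax m' (G_fst_mem r m' t' hG)
    have h1 : (if m > m' then m else m') = m := by
      split <;> omega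
    simp [G, hG, h1]

/-- Prepending elements that are all ≤ the running maximum adds their deficits. -/
theorem G_append (l : List Int) (rest : List Int) (m t : Int)
    (hle : ∀ y ∈ l, y ≤ m) (hG : G rest = some (m, t)) :
    G (l ++ rest) = some (m, t + (m * l.length - l.sum)) := by
  induction l with
  | nil => simpa using hG
  | cons x l ih =>
    have hx : x ≤ m := hle x (by simp)
    have hle' : ∀ y ∈ l, y ≤ m := fun y hy => hle y (by simp [hy])
    have hG' := ih hle'
    have h1 : (if x > m then x else m) = m := by
      split <;> omega
    simp only [List.cons_append, G, hG', h1, Option.some.injEq, Prod.mk.injEq,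
      List.length_cons, List.sum_cons]
    constructor
    · trivial
    · push_cast; ring

theorem foldr_bstep_eq_G (x : Int) (xs : List Int) :
    G (x :: xs) =
      some ((x :: xs).foldr (fun h st => bstep st h) ((x :: xs).getLast (by simp), 0)) := by
  induction xs generalizing x with
  | nil => simp [G, bstep]
  | cons y ys ih =>
    have ihy := ih y
    cases hG : G (y :: ys) with
    | none => rw [hG] at ihy; simp at ihy
    | some p =>
      obtain ⟨m, t⟩ := p
      rw [hG] at ihy
      have hft : (y :: ys).foldr (fun h st => bstep st h) ((y :: ys).getLast (by simp), 0) = (m, t) :=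
        (Option.some.inj ihy).symm
      have hlast : (x :: y :: ys).getLast (by simp) = (y :: ys).getLast (by simp) := rfl
      rw [hlast, List.foldr_cons, hft]
      conv_lhs => rw [G, hG]
      simp [bstep]

theorem B_eq_G (xs : List Int) (hne : xs ≠ []) :
    find_forward_total_alt xs = (G xs).elim 0 Prod.snd := by
  obtain ⟨x, t, rfl⟩ : ∃ y ys, xs = y :: ys := by
    cases xs with
    | nil => exact absurd rfl hne
    | cons a b => exact ⟨a, b, rfl⟩
  have hget : PySem.List.pyGet? (x :: t) (-1) = some ((x :: t).getLast (by simp)) := by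
    rw [PySem.List.pyGet?_neg_one]
    simp [List.getLast?_eq_some_getLast]
  simp only [find_forward_total_alt, hget]
  rw [List.foldl_reverse, foldr_bstep_eq_G x t]
  rfl

theorem A_eq_G (xs : List Int) (hne : xs ≠ []) :
    find_forward_total xs = (G xs).elim 0 Prod.snd := by
  obtain ⟨m, hm⟩ : ∃ m, PySem.List.max? xs (fun y => y) = some m := by
    cases hmx : PySem.List.max? xs (fun y => y) with
    | none => exact absurd (((PySem.List.max?_eq_none_iff _ _).mp hmx)) hne
    | some m => exact ⟨m, rfl⟩
  have hmem : m ∈ xs := PySem.List.max?_mem hm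
  have hmax : ∀ y ∈ xs, y ≤ m := fun y hy => PySem.List.max?_isMax hm y hy
  obtain ⟨loc, hloc⟩ : ∃ loc, PySem.List.index? xs m = some loc :=
    Option.isSome_iff_exists.mp (((PySem.List.index?_isSome_iff _ _).mpr hmem))
  obtain ⟨pre, suf, hxs, hlen, hnotin⟩ := ((PySem.List.index?_eq_some_iff _ _ _).mp hloc)
  rw [find_forward_total]
  simp only [hm, hloc]
  by_cases h2 : xs.length < 2
  · rw [dif_pos h2]
    have h1 : xs.length = 1 := by
      cases xs with
      | nil => exact absurd rfl hne
      | cons a b => simp at h2 ⊢; omega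
    obtain ⟨a, ha⟩ := List.length_eq_one_iff.mp h1
    simp [ha, G]
  · rw [dif_neg h2]
    have hlensplit : xs.length = pre.length + 1 + suf.length := by simp [hxs]; omega
    by_cases h0 : loc = 0
    · rw [dif_pos h0]
      have hpre : pre = [] := List.eq_nil_of_length_eq_zero (by omega)
      have hxs' : xs = m :: suf := by rw [hxs, hpre]; rfl
      have hsuf : suf ≠ [] := by
        intro h; rw [hxs', h] at h2; simp at h2
      have hslice : PySem.List.slice xs (some 1) none = suf := by
        rw [PySem.List.slice_from_one, hxs']; rfl
      rw [hslice, A_eq_G suf hsuf, hxs',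
        G_cons_max m suf (fun y hy => hmax y (by rw [hxs']; exact List.mem_cons_of_mem m hy))]
      simp
    · rw [dif_neg h0]
      have hmaxpre : ∀ y ∈ pre, y ≤ m := fun y hy => hmax y (by rw [hxs]; exact List.mem_append_left _ hy)
      have hmaxsuf : ∀ y ∈ suf, y ≤ m := fun y hy => hmax y (by
        rw [hxs]; exact List.mem_append_right _ (List.mem_cons_of_mem m hy))
      have hget : PySem.List.pyGet? xs (loc : Int) = some m := by
        rw [hxs, ← hlen]; exact PySem.List.pyGet?_append_length pre suf m
      have htake : PySem.List.slice xs none (some (loc : Int)) = pre := by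
        rw [PySem.List.slice_to_natCast, hxs, ← hlen, List.take_left]
      by_cases hend : loc + 1 = xs.length
      · rw [if_pos hend]
        have hsuf : suf = [] := List.eq_nil_of_length_eq_zero (by omega)
        have hGxs : G xs = some (m, 0 + (m * pre.length - pre.sum)) := by
          rw [hxs, hsuf]
          exact G_append pre [m] m 0 hmaxpre (by simp [G])
        rw [hget, htake, hGxs]
        simp only [Option.getD_some, Option.elim_some]
        rw [← hlen]
        ring
      · rw [if_neg hend]
        have hsuf : suf ≠ [] := by
          intro h
          subst h
          simp at hlensplit
          omega
        have hslice : PySem.List.slice xs (some ((loc : Int) + 1)) none = suf := by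
          have hc : ((loc : Int) + 1) = ((loc + 1 : Nat) : Int) := by push_cast; ring
          rw [hc, PySem.List.slice_from_natCast, hxs, List.append_cons, ← hlen]
          have : (pre ++ [m]).length = pre.length + 1 := by simp
          rw [← this, List.drop_left]
        have hGsuf : G (m :: suf) = some (m, (G suf).elim 0 Prod.snd) := G_cons_max m suf hmaxsuf
        have hGxs : G xs = some (m, (G suf).elim 0 Prod.snd + (m * pre.length - pre.sum)) := by
          rw [hxs]; exact G_append pre (m :: suf) m _ hmaxpre hGsuf
        rw [hget, htake, hslice, A_eq_G suf hsuf, hGxs]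
        simp only [Option.getD_some, Option.elim_some]
        rw [← hlen]
        ring
termination_by xs.length
decreasing_by
  all_goals simp [hxs]; omega

-- ===== VERDICT (by name: the statement is the Claim_ definition above) =====
theorem find_forward_total_spec : Claim_equal_find_forward_total := by
  intro xs _hdom hpre
  unfold Spec_find_forward_total
  rw [A_eq_G xs hpre, B_eq_G xs hpre]
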